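-- pv_equiv track=rewrite | github.com/emsec/hal | tools/check_documentation.py | index_of_last_block
-- ===== SOURCE A (Python) =====
-- def index_of_last_block(text, block_start, block_end):
--     last_end = len(text) - 1 - text[::-1].index(block_end)
--     level = -1
--     for i in range(last_end-1, -1, -1):
--         if text[i] == block_end: level -= 1
--         if text[i] == block_start:
--             level += 1
--             if level == 0:
--                 return i
--     return None
-- ===== SOURCE B (Python) =====
-- def index_of_last_block(text, block_start, block_end):
--     # forward single pass with a stack of open-block indices (return value only)
--     last_end = len(text) - 1 - text[::-1].index(block_end)
--     if block_start == block_end: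
--         return None  # identical delimiters can never delimit a nested block
--     stack = []
--     for i in range(last_end):
--         c = text[i]
--         if c == block_start:
--             stack.append(i)
--         elif c == block_end and stack:
--             stack.pop()
--     return stack[-1] if stack else None
-- ===== Notes on version B (the rewrite author's own statement) =====
-- stated objective: alternative
-- what changed: A scans backwards from the last block_end with a nesting-level counter and an early return; B makes one forward pass maintaining a stack of open-block indices (push on block_start, pop on block_end) and returns the top of the stack, with an explicit early None for identical delimiters.
import Mathlib
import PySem

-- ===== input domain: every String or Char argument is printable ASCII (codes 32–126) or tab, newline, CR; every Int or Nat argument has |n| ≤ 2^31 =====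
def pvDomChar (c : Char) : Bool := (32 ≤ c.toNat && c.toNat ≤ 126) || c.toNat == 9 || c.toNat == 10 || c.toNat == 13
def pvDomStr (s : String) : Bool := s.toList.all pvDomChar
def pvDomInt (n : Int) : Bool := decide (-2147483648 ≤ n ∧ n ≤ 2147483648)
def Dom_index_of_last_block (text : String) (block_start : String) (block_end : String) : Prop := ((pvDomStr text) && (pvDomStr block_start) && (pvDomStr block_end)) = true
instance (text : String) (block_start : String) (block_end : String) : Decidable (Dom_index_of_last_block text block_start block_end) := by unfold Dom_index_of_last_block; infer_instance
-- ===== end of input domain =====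

-- B replaces A's backward level-counting scan by a forward pass with a stack of open-block
-- indices (objective: alternative single-pass formulation; return value only, no mutation).

-- ===== PORT A =====
-- A's loop `for i in range(last_end-1, -1, -1)`: level counter, early return on level == 0.
-- `text[i] == block_end` compares the 1-char string text[i] with the string block_end: [c] = be.
def iolbLoopA (tl bs be : List Char) : List Int → Int → Option Int
  | [], _ => none
  | i :: rest, level =>
    let c := PySem.List.pyGetD tl i ' '
    let level1 := if [c] = be then level - 1 else level
    if [c] = bs then
      (if level1 + 1 = 0 then some i else iolbLoopA tl bs be rest (level1 + 1))
    else iolbLoopA tl bs be rest level1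

def index_of_last_block (text : String) (block_start : String) (block_end : String) : Option Int :=
  let tl := text.toList
  -- text[::-1] is tl.reverse (PySem.List.slice?_none_none_neg_one); .index raises ValueError
  -- exactly when find = -1 — those inputs are excluded by Pre_ (the port returns none there).
  let idx := PySem.Chars.find tl.reverse block_end.toList
  if idx < 0 then none
  else
    let last_end : Int := (tl.length : Int) - 1 - idx
    iolbLoopA tl block_start.toList block_end.toList (PySem.List.pyRange (last_end - 1) (-1) (-1)) (-1)

-- ===== PORT B =====
-- B's loop body: push on block_start, pop on block_end ('and stack' guard: List.tail [] = []).
-- Python's stack grows at the list end; the port keeps the top at the head, so stack[-1] is head?.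
def iolbStepB (bs be : List Char) (st : List Int) (i : Int) (c : Char) : List Int :=
  if [c] = bs then i :: st
  else if [c] = be then st.tail
  else st

def index_of_last_block_alt (text : String) (block_start : String) (block_end : String) : Option Int :=
  let tl := text.toList
  let idx := PySem.Chars.find tl.reverse block_end.toList
  if idx < 0 then none  -- ValueError in Python, outside Pre_
  else if block_start = block_end then none  -- identical delimiters can never delimit a nested block
  else
    let last_end : Int := (tl.length : Int) - 1 - idx
    ((PySem.List.pyRange 0 last_end 1).foldl
      (fun st i => iolbStepB block_start.toList block_end.toList st i (PySem.List.pyGetD tl i ' ')) []).head?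

-- ===== PRECONDITION & SPEC =====
-- Pre_ excludes exactly the inputs where Python's `.index` raises ValueError:
-- block_end must occur (as a substring) in the reversed text.
def Pre_index_of_last_block (text : String) (_block_start : String) (block_end : String) : Prop :=
  block_end.toList <:+: text.toList.reverse
instance (text : String) (_block_start : String) (block_end : String) : Decidable (Pre_index_of_last_block text _block_start block_end) := by unfold Pre_index_of_last_block; infer_instance

def pvWitness_index_of_last_block : String × String × String := ("(a)", "(", ")")

def Spec_index_of_last_block (text : String) (block_start : String) (block_end : String) (out : Option Int) : Prop := out = index_of_last_block_alt text block_start block_end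
instance (text : String) (block_start : String) (block_end : String) (out : Option Int) : Decidable (Spec_index_of_last_block text block_start block_end out) := by unfold Spec_index_of_last_block; infer_instance

-- ===== CLAIM (what is proved, stated in full; the proofs are below) =====
def Claim_equal_index_of_last_block : Prop := ∀ (text : String) (block_start : String) (block_end : String), Dom_index_of_last_block text block_start block_end → Pre_index_of_last_block text block_start block_end → Spec_index_of_last_block text block_start block_end (index_of_last_block text block_start block_end)

-- ===== LEMMAS AND PROOFS =====

-- (i, text[i]) pairs: the common currency of the two loop shapes.
def iolbPair (tl : List Char) (k : Nat) : Int × Char := ((k : Int), tl.getD k ' ')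

-- A's scan, rephrased over (index, char) pairs.
def iolbBScan (bs be : List Char) : Int → List (Int × Char) → Option Int
  | _, [] => none
  | level, p :: rest =>
    let level1 := if [p.2] = be then level - 1 else level
    if [p.2] = bs then
      (if level1 + 1 = 0 then some p.1 else iolbBScan bs be (level1 + 1) rest)
    else iolbBScan bs be level1 rest

-- B's step over a pair.
def iolbStepP (bs be : List Char) (st : List Int) (p : Int × Char) : List Int :=
  iolbStepB bs be st p.1 p.2

theorem iolbLoopA_eq_bscan (tl bs be : List Char) (l : List Nat) (lvl : Int) :
    iolbLoopA tl bs be (l.map (fun k : Nat => (k : Int))) lvl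
      = iolbBScan bs be lvl (l.map (iolbPair tl)) := by
  induction l generalizing lvl with
  | nil => rfl
  | cons a l ih =>
    simp only [List.map_cons, iolbLoopA, iolbBScan, iolbPair, PySem.List.pyGetD_natCast]
    split_ifs <;> simp [ih]

theorem iolbLoopA_same_none (tl bs : List Char) (l : List Int) (lvl : Int) (h : lvl < 0) :
    iolbLoopA tl bs bs l lvl = none := by
  induction l generalizing lvl with
  | nil => rfl
  | cons a l ih =>
    simp only [iolbLoopA]
    split_ifs <;> first
      | (exfalso; omega)
      | (apply ih; omega)

-- The heart: A's backward level scan over the reversed prefix, started at level -1-k, reads the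
-- k-th entry (from the top) of B's forward stack over the prefix — for distinct delimiters.
theorem iolbBScan_eq_stack (tl bs be : List Char) (hne : bs ≠ be) (l : List Nat) (k : Nat) :
    iolbBScan bs be (-1 - (k : Int)) (l.reverse.map (iolbPair tl))
      = ((l.map (iolbPair tl)).foldl (iolbStepP bs be) [])[k]? := by
  induction l using List.reverseRecOn generalizing k with
  | nil => simp [iolbBScan]
  | append_singleton l a ih =>
    have hrev : (l ++ [a]).reverse = a :: l.reverse := by simp
    rw [hrev]
    simp only [List.map_cons, List.map_append, List.map_cons, List.map_nil,
      List.foldl_append, List.foldl_cons, List.foldl_nil]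
    set S := (l.map (iolbPair tl)).foldl (iolbStepP bs be) [] with hS
    simp only [iolbBScan, iolbStepP, iolbStepB, iolbPair]
    simp only [List.getD_eq_getElem?_getD]
    set c := tl[a]?.getD ' ' with hc
    by_cases hbs : [c] = bs
    · have hbe : ¬ [c] = be := fun hbe => hne (hbs ▸ hbe ▸ rfl)
      rw [if_neg hbe, if_pos hbs, if_pos hbs]
      cases k with
      | zero => simp
      | succ j =>
        have h1 : ¬ (-1 - ((j + 1 : Nat) : Int) + 1 = 0) := by push_cast; omega
        have h2 : (-1 - ((j + 1 : Nat) : Int) + 1) = -1 - (j : Int) := by push_cast; omega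
        rw [if_neg h1, h2, ih j]
        simp
    · rw [if_neg hbs, if_neg hbs]
      by_cases hbe : [c] = be
      · rw [if_pos hbe, if_pos hbe]
        have h2 : (-1 - (k : Int) - 1) = -1 - ((k + 1 : Nat) : Int) := by push_cast; omega
        rw [h2, ih (k + 1), List.getElem?_tail]
      · rw [if_neg hbe, if_neg hbe, ih k]

-- ===== VERDICT (by name: the statement is the Claim_ definition above) =====
theorem index_of_last_block_spec : Claim_equal_index_of_last_block := by
  intro text bs be _ hpre
  unfold Spec_index_of_last_block index_of_last_block index_of_last_block_alt
  simp only []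
  set tl := text.toList with htl
  set idx := PySem.Chars.find tl.reverse be.toList with hidx
  have hne1 : idx ≠ -1 := (PySem.Chars.find_ne_neg_one_iff _ _).mpr (by simpa using hpre)
  have hge : -1 ≤ idx := PySem.Chars.neg_one_le_find _ _
  have hle : idx ≤ (tl.reverse.length : Int) := PySem.Chars.find_le_length _ _
  have h0 : ¬ idx < 0 := by omega
  rw [if_neg h0, if_neg h0]
  set last_end : Int := (tl.length : Int) - 1 - idx with hlast
  by_cases hsb : bs = be
  · rw [if_pos hsb]
    have : bs.toList = be.toList := by rw [hsb]
    rw [← this]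
    exact iolbLoopA_same_none tl bs.toList _ _ (by omega)
  · rw [if_neg hsb]
    have hnel : bs.toList ≠ be.toList := fun h => hsb (String.toList_inj.mp h)
    have hlen : (tl.reverse.length : Int) = (tl.length : Int) := by simp
    by_cases hneg : last_end < 0
    · have h1 : PySem.List.pyRange (last_end - 1) (-1) (-1) = [] :=
        PySem.List.pyRange_neg_one_eq_nil (by omega)
      have h2 : PySem.List.pyRange 0 last_end 1 = [] :=
        PySem.List.pyRange_one_eq_nil (by omega)
      rw [h1, h2]
      rfl
    · rw [not_lt] at hneg
      obtain ⟨m, hm⟩ : ∃ m : Nat, last_end = (m : Int) := ⟨last_end.toNat, (Int.toNat_of_nonneg hneg).symm⟩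
      rw [hm]
      have hA : PySem.List.pyRange ((m : Int) - 1) (-1) (-1)
          = ((List.range m).reverse.map (fun k : Nat => (k : Int))) := by
        rw [PySem.List.pyRange_neg_one_eq_reverse]
        have h3 : (m : Int) - 1 + 1 = (m : Int) := by omega
        have h4 : (-1 : Int) + 1 = 0 := by omega
        rw [h3, h4, PySem.List.pyRange_zero_nat, List.map_reverse]
      have hB : (PySem.List.pyRange 0 (m : Int) 1).foldl
            (fun st i => iolbStepB bs.toList be.toList st i (PySem.List.pyGetD tl i ' ')) []
          = (((List.range m).map (iolbPair tl)).foldl (iolbStepP bs.toList be.toList) []) := by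
        rw [PySem.List.pyRange_zero_nat, List.foldl_map, List.foldl_map]
        have hfun : (fun (st : List Int) (k : Nat) =>
              iolbStepB bs.toList be.toList st (k : Int) (PySem.List.pyGetD tl (k : Int) ' '))
            = (fun (st : List Int) (k : Nat) => iolbStepP bs.toList be.toList st (iolbPair tl k)) := by
          funext st k
          simp [iolbStepP, iolbStepB, iolbPair]
        rw [hfun]
      rw [hA, hB, iolbLoopA_eq_bscan]
      have := iolbBScan_eq_stack tl bs.toList be.toList hnel (List.range m) 0
      simpa [List.head?_eq_getElem?] using this
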